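-- pv_equiv track=rewrite | github.com/seongbokim/vscode | java/최고의집합.py | solution
-- ===== SOURCE A (Python) =====
-- def solution(n, s):
--     if s < n:
--         return [-1]  # 합 s를 n개의 자연수로 만들 수 없는 경우
--
--     # 기본 분배 몫과 나머지를 계산
--     base = s // n
--     remainder = s % n
--
--     # n개의 기본 값을 base로 설정
--     answer = [base] * n
--
--     # 나머지를 분배하여 각 원소에 1씩 추가
--     for i in range(remainder):
--         answer[i] += 1
--
--     # 결과를 오름차순으로 반환
--     return sorted(answer)
-- ===== SOURCE B (Python) =====
-- def solution(n, s):
--     if s < n: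
--         return [-1]
--     # Greedy peel: the smallest element of the optimal ascending distribution is
--     # s // n; emit it, remove it from the sum, and repeat on one fewer slot.
--     out = []
--     while n > 0:
--         m = s // n
--         out.append(m)
--         s -= m
--         n -= 1
--     return out
-- ===== Notes on version B (the rewrite author's own statement) =====
-- stated objective: alternative
-- what changed: B replaces A's make-n-copies / increment-the-first-remainder-slots / sort pipeline by a single greedy peeling loop that repeatedly emits the current floor average s//n, subtracts it from s and decrements n, producing the ascending list directly with no sort.
import Mathlib
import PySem

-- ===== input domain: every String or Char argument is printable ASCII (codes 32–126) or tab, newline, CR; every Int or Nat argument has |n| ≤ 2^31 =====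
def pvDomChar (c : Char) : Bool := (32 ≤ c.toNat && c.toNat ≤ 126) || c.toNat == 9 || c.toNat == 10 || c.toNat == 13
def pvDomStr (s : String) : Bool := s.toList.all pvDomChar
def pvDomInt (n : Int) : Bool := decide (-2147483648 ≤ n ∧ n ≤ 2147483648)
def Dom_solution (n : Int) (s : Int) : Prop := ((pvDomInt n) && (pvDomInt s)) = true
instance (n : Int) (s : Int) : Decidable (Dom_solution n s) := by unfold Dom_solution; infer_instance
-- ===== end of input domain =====

-- B replaces A's copy/increment/sort pipeline by one greedy peeling loop: repeatedly
-- emit the current floor average s//n, subtract it and decrement n (objective: alternative).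
-- Pre_ excludes only n = 0 with 0 <= s, where A raises ZeroDivisionError.
-- ===== PORT A =====
def solution (n : Int) (s : Int) : List Int :=
  if s < n then [-1]
  else
    let base := PySem.Int.floordiv s n
    let remainder := PySem.Int.mod s n
    let answer := PySem.List.pyRepeat [base] n
    let answer := (PySem.List.pyRange 0 remainder 1).foldl
      (fun a i => PySem.List.pySetD a i (PySem.List.pyGetD a i 0 + 1)) answer
    PySem.List.sorted answer (fun x => x) false

-- ===== PORT B =====
-- B's while-loop: emit s//n, subtract it from s, decrement n, until n = 0.
def solAltLoop (n : Int) (s : Int) (out : List Int) : List Int :=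
  if _h : 0 < n then
    solAltLoop (n - 1) (s - PySem.Int.floordiv s n) (out ++ [PySem.Int.floordiv s n])
  else out
termination_by n.toNat
decreasing_by omega

def solution_alt (n : Int) (s : Int) : List Int :=
  if s < n then [-1]
  else solAltLoop n s []

-- ===== PRECONDITION & SPEC =====
-- A raises ZeroDivisionError exactly when n = 0 and 0 <= s; those inputs are excluded.
def Pre_solution (n : Int) (s : Int) : Prop := n = 0 → s < 0
instance (n : Int) (s : Int) : Decidable (Pre_solution n s) := by unfold Pre_solution; infer_instance
def pvWitness_solution : Int × Int := (5, 14)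
def Spec_solution (n : Int) (s : Int) (out : List Int) : Prop := out = solution_alt n s
instance (n : Int) (s : Int) (out : List Int) : Decidable (Spec_solution n s out) := by unfold Spec_solution; infer_instance

-- ===== CLAIM (what is proved, stated in full; the proofs are below) =====
def Claim_equal_solution : Prop := ∀ (n : Int) (s : Int), Dom_solution n s → Pre_solution n s → Spec_solution n s (solution n s)

-- ===== LEMMAS AND PROOFS =====

-- after k iterations of A's loop on [base]*m, the first k slots hold base+1
lemma pv_loop (base : Int) (m k : Nat) (hk : k ≤ m) :
    (PySem.List.pyRange 0 (k : Int) 1).foldl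
      (fun a i => PySem.List.pySetD a i (PySem.List.pyGetD a i 0 + 1)) (List.replicate m base)
    = List.replicate k (base + 1) ++ List.replicate (m - k) base := by
  induction k with
  | zero => simp [PySem.List.pyRange_one_eq_nil]
  | succ k ih =>
    have h1 : (0:Int) ≤ (k:Int) := by omega
    have : PySem.List.pyRange 0 ((k:Int)+1) 1
        = PySem.List.pyRange 0 (k:Int) 1 ++ [(k:Int)] := by
      simpa using PySem.List.pyRange_one_succ_right h1
    push_cast
    rw [this, List.foldl_append, ih (Nat.le_of_succ_le hk)]
    simp only [List.foldl]
    have hget : PySem.List.pyGetD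
        (List.replicate k (base+1) ++ List.replicate (m-k) base) (k:Int) 0 = base := by
      rw [PySem.List.pyGetD_natCast]
      have hmk : 0 < m - k := by omega
      simp [List.getD, hmk]
    rw [hget, PySem.List.pySetD_natCast]
    have hset : (List.replicate k (base+1) ++ List.replicate (m-k) base).set k (base+1)
        = List.replicate (k+1) (base+1) ++ List.replicate (m-(k+1)) base := by
      have hmk : m - k = (m - (k+1)) + 1 := by omega
      rw [hmk, List.replicate_succ, List.set_append_right _ _ (by simp)]
      simp [List.replicate_succ' (n := k)]
    rw [hset]

-- the floor average of b*k + r with 0 ≤ r < k is b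
lemma pv_fd (b r : Int) (k : Int) (h0 : 0 ≤ r) (hk : r < k) :
    PySem.Int.floordiv (b * k + r) k = b := by
  rw [PySem.Int.floordiv_eq_iff_of_pos (by omega)]
  constructor <;> nlinarith

-- B's greedy loop on b*k + r (0 ≤ r < k) emits (k - r) copies of b then r copies of b+1
lemma pv_loopB (k : Nat) : ∀ (b r : Int) (out : List Int), 0 ≤ r → r < (k : Int) →
    solAltLoop (k : Int) (b * k + r) out
      = out ++ List.replicate (k - r.toNat) b ++ List.replicate r.toNat (b + 1) := by
  induction k with
  | zero => intro b r out h0 hk; omega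
  | succ k ih =>
    intro b r out h0 hk
    rw [solAltLoop]
    rw [dif_pos (by push_cast; omega)]
    have hfd : PySem.Int.floordiv (b * ((k:Int)+1) + r) ((k:Int)+1) = b := by
      have := pv_fd b r ((k:Int)+1) h0 (by push_cast at hk ⊢; omega)
      simpa using this
    push_cast
    rw [hfd]
    have hs : b * ((k:Int) + 1) + r - b = b * (k:Int) + r := by ring
    have hn : (k:Int) + 1 - 1 = (k:Int) := by ring
    rw [hs, hn]
    by_cases hr : r < (k : Int)
    · rw [ih b r _ h0 hr]
      have h1 : k + 1 - r.toNat = (k - r.toNat) + 1 := by omega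
      rw [h1, List.replicate_succ]
      simp
    · have hrk : r = (k : Int) := by push_cast at hk; omega
      by_cases hk0 : k = 0
      · subst hk0
        have hr0 : r = 0 := by omega
        subst hr0
        rw [solAltLoop, dif_neg (by norm_num)]
        simp
      · have hs2 : b * (k:Int) + r = (b+1) * (k:Int) + 0 := by rw [hrk]; ring
        rw [hs2, ih (b+1) 0 _ (le_refl 0) (by omega)]
        rw [hrk]
        simp

theorem solution_eq (n s : Int) (_hd : Dom_solution n s) (hp : Pre_solution n s) :
    solution n s = solution_alt n s := by
  unfold solution solution_alt
  by_cases hsn : s < n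
  · simp [hsn]
  · simp only [hsn, if_false]
    have hn0 : n ≠ 0 := by
      intro h; subst h; exact hsn (hp rfl)
    rcases lt_or_gt_of_ne hn0 with hneg | hpos
    · -- n < 0: both sides are []
      have hrem := PySem.Int.mod_neg_bounds (a := s) (b := n) hneg
      have h1 : PySem.List.pyRange 0 (PySem.Int.mod s n) 1 = [] :=
        PySem.List.pyRange_one_eq_nil (by omega)
      have h2 : PySem.List.pyRepeat [PySem.Int.floordiv s n] n = [] := by
        rw [PySem.List.pyRepeat_singleton]
        simp [Int.toNat_of_nonpos (by omega : n ≤ 0)]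
      rw [h1, h2, solAltLoop, dif_neg (by omega)]
      rfl
    · -- n > 0
      have hr0 : 0 ≤ PySem.Int.mod s n := PySem.Int.mod_nonneg (a := s) (b := n) hpos
      have hrn : PySem.Int.mod s n < n := PySem.Int.mod_lt (a := s) (b := n) hpos
      set b := PySem.Int.floordiv s n with hb
      set r := PySem.Int.mod s n with hr
      -- A side: replicate form
      have hrep : PySem.List.pyRepeat [b] n = List.replicate n.toNat b :=
        PySem.List.pyRepeat_singleton _ _
      have hcast : r = ((r.toNat : Nat) : Int) := (Int.toNat_of_nonneg hr0).symm
      have hk : r.toNat ≤ n.toNat := by omega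
      rw [hrep, hcast, pv_loop b n.toNat r.toNat hk]
      -- B side: greedy loop form
      have hsum : b * n + r = s := by
        have := PySem.Int.floordiv_mul_add_mod s n
        rw [← hb, ← hr] at this; linarith
      have hncast : n = ((n.toNat : Nat) : Int) := by omega
      have hBs : solAltLoop n s [] =
          List.replicate (n.toNat - r.toNat) b ++ List.replicate r.toNat (b + 1) := by
        have := pv_loopB n.toNat b r [] hr0 (by omega)
        rw [← hncast, hsum] at this
        simpa using this
      rw [hBs]
      apply PySem.List.sorted_id_eq_of_perm_of_pairwise
      · exact List.perm_append_comm
      · rw [List.pairwise_append]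
        refine ⟨List.pairwise_replicate.2 (by simp), List.pairwise_replicate.2 (by simp), ?_⟩
        intro x hx y hy
        rw [List.eq_of_mem_replicate hx, List.eq_of_mem_replicate hy]
        omega

-- ===== VERDICT (by name: the statement is the Claim_ definition above) =====
theorem solution_spec : Claim_equal_solution := by
  intro n s hd hp
  exact solution_eq n s hd hp
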